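-- pv_equiv track=rewrite | github.com/Fauter/ParkingApp-Back | imprimir_ticket_cierredecaja.py | _pick_fallback
-- ===== SOURCE A (Python) =====
-- def _normalize(s: str) -> str:
--     return (s or "").strip().lower()
--
-- def _pick_fallback(config_name, printers, default_name):
--     by_norm = {_normalize(n): n for n in printers}
--     if config_name:
--         n_cfg = _normalize(config_name)
--         if n_cfg in by_norm:
--             return by_norm[n_cfg], "config"
--         for n in printers:
--             if _normalize(n) == n_cfg:
--                 return n, "config"
--     for n in printers:
--         ln = _normalize(n)
--         if ("58" in ln) or ("xp-58" in ln) or ("pos" in ln):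
--             return n, "fallback-termica"
--     if default_name:
--         nd = _normalize(default_name)
--         if nd in by_norm:
--             return by_norm[nd], "default"
--         for n in printers:
--             if _normalize(n) == nd:
--                 return n, "default"
--     if printers:
--         return printers[0], "primera"
--     return None, "none"
-- ===== SOURCE B (Python) =====
-- def _normalize(s: str) -> str:
--     return (s or "").strip().lower()
--
-- def _pick_fallback(config_name, printers, default_name):
--     # one pass: last normalized-equal hit for config/default, first termica hit
--     n_cfg = _normalize(config_name) if config_name else None
--     n_def = _normalize(default_name) if default_name else None
--     config_hit = termica_hit = default_hit = None
--     for n in printers: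
--         ln = _normalize(n)
--         if ln == n_cfg:
--             config_hit = n                      # last match (dict-overwrite order)
--         if termica_hit is None and ("58" in ln or "pos" in ln):
--             termica_hit = n                     # first match
--         if ln == n_def:
--             default_hit = n                     # last match
--     if config_hit is not None:
--         return config_hit, "config"
--     if termica_hit is not None:
--         return termica_hit, "fallback-termica"
--     if default_hit is not None:
--         return default_hit, "default"
--     if printers:
--         return printers[0], "primera"
--     return None, "none"
-- ===== Notes on version B (the rewrite author's own statement) =====
-- stated objective: alternative
-- what changed: Replaces A's normalized-name dict plus three separate scans (config rescue scan, termica scan, default rescue scan) by a single pass that normalizes each printer once, recording the last config hit, the first termica hit and the last default hit, then decides by the original priority.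
import Mathlib
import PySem

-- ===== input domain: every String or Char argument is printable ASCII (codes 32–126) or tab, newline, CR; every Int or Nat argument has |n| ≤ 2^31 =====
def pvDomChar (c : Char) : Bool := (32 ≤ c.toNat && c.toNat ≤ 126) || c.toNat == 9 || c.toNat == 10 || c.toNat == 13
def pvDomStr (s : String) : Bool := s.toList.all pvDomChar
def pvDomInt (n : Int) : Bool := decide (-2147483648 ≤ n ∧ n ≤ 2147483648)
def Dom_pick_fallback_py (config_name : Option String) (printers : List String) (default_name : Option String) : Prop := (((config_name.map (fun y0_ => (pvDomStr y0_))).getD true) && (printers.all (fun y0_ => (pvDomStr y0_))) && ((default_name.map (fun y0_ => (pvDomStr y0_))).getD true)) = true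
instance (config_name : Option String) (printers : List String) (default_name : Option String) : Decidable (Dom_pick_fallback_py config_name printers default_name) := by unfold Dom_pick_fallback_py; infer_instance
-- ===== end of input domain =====

-- B replaces A's dict + three separate scans by a single pass that records the last
-- config/default hit and the first termica hit (objective: alternative one-pass decomposition).

-- _normalize(s) for a str argument: (s or "") = s for strip/lower purposes
def pyNorm (s : String) : String := PySem.Str.lower (PySem.Str.strip s)

-- ===== PORT A =====
def pick_fallback_py (config_name : Option String) (printers : List String) (default_name : Option String) : Option String × String :=
  let by_norm : PySem.Dict String String :=
    printers.foldl (fun d n => d.insert (pyNorm n) n) PySem.Dict.empty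
  let cfgTry : Option (Option String × String) :=
    if (config_name.getD "") ≠ "" then
      let n_cfg := pyNorm (config_name.getD "")
      match by_norm.get? n_cfg with
      | some v => some (some v, "config")
      | none =>
        match printers.find? (fun n => pyNorm n == n_cfg) with
        | some n => some (some n, "config")
        | none => none
    else none
  match cfgTry with
  | some r => r
  | none =>
    match printers.find? (fun n =>
        let ln := pyNorm n
        PySem.Str.isIn "58" ln || PySem.Str.isIn "xp-58" ln || PySem.Str.isIn "pos" ln) with
    | some n => (some n, "fallback-termica")
    | none =>
      let defTry : Option (Option String × String) :=
        if (default_name.getD "") ≠ "" then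
          let nd := pyNorm (default_name.getD "")
          match by_norm.get? nd with
          | some v => some (some v, "default")
          | none =>
            match printers.find? (fun n => pyNorm n == nd) with
            | some n => some (some n, "default")
            | none => none
        else none
      match defTry with
      | some r => r
      | none =>
        match printers with
        | n :: _ => (some n, "primera")
        | [] => (none, "none")

-- ===== PORT B =====
def pvTermica (ln : String) : Bool := PySem.Str.isIn "58" ln || PySem.Str.isIn "pos" ln

def pvLastHit (target : Option String) (acc : Option String) (n : String) : Option String :=
  if target == some (pyNorm n) then some n else acc

def pvFirstTermica (acc : Option String) (n : String) : Option String :=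
  match acc with
  | some _ => acc
  | none => if pvTermica (pyNorm n) then some n else none

def pick_fallback_py_alt (config_name : Option String) (printers : List String) (default_name : Option String) : Option String × String :=
  let n_cfg : Option String :=
    match config_name with
    | some c => if c ≠ "" then some (pyNorm c) else none
    | none => none
  let n_def : Option String :=
    match default_name with
    | some d => if d ≠ "" then some (pyNorm d) else none
    | none => none
  let hits : Option String × Option String × Option String :=
    printers.foldl
      (fun acc n => (pvLastHit n_cfg acc.1 n, pvFirstTermica acc.2.1 n, pvLastHit n_def acc.2.2 n))
      (none, none, none)
  match hits.1 with
  | some c => (some c, "config")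
  | none =>
    match hits.2.1 with
    | some t => (some t, "fallback-termica")
    | none =>
      match hits.2.2 with
      | some d => (some d, "default")
      | none =>
        match printers with
        | n :: _ => (some n, "primera")
        | [] => (none, "none")

-- ===== PRECONDITION & SPEC =====
def Spec_pick_fallback_py (config_name : Option String) (printers : List String) (default_name : Option String) (out : Option String × String) : Prop := out = pick_fallback_py_alt config_name printers default_name
instance (config_name : Option String) (printers : List String) (default_name : Option String) (out : Option String × String) : Decidable (Spec_pick_fallback_py config_name printers default_name out) := by unfold Spec_pick_fallback_py; infer_instance

-- ===== CLAIM (what is proved, stated in full; the proofs are below) =====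
def Claim_equal_pick_fallback_py : Prop := ∀ (config_name : Option String) (printers : List String) (default_name : Option String), Dom_pick_fallback_py config_name printers default_name → Spec_pick_fallback_py config_name printers default_name (pick_fallback_py config_name printers default_name)

-- ===== LEMMAS AND PROOFS =====

-- the triple fold splits into three independent folds
theorem foldl_triple {α : Type} (f g h : Option String → α → Option String)
    (l : List α) (a b c : Option String) :
    l.foldl (fun acc n => (f acc.1 n, g acc.2.1 n, h acc.2.2 n)) (a, b, c)
      = (l.foldl f a, l.foldl g b, l.foldl h c) := by
  induction l generalizing a b c with
  | nil => rfl
  | cons x xs ih => rw [List.foldl_cons, List.foldl_cons, List.foldl_cons, List.foldl_cons, ih]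

-- dict-comprehension lookup = last matching fold
theorem get?_comprehension (l : List String) (d : PySem.Dict String String) (k : String) :
    (l.foldl (fun d n => d.insert (pyNorm n) n) d).get? k
      = l.foldl (fun acc n => if k = pyNorm n then some n else acc) (d.get? k) := by
  induction l generalizing d with
  | nil => rfl
  | cons x xs ih => rw [List.foldl_cons, List.foldl_cons, ih, PySem.Dict.get?_insert]

theorem pvLastHit_some_eq (k : String) :
    pvLastHit (some k) = fun acc n => if k = pyNorm n then some n else acc := by
  funext a n
  by_cases h : k = pyNorm n <;> simp [pvLastHit, h]

theorem lastHit_none (l : List String) (a : Option String) :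
    l.foldl (pvLastHit none) a = a := by
  induction l generalizing a with
  | nil => rfl
  | cons x xs ih => rw [List.foldl_cons]; rw [show pvLastHit none a x = a from rfl, ih]

-- a last-match fold that ends at `none` means no element matches, so find? is none too
theorem lastFold_none_find?_none (l : List String) (k : String) (a : Option String)
    (h : l.foldl (fun acc n => if k = pyNorm n then some n else acc) a = none) :
    a = none ∧ l.find? (fun n => pyNorm n == k) = none := by
  induction l generalizing a with
  | nil => exact ⟨h, rfl⟩
  | cons x xs ih =>
    rw [List.foldl_cons] at h
    obtain ⟨h1, h2⟩ := ih _ h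
    by_cases hx : k = pyNorm x
    · simp [hx] at h1
    · have hbx : (pyNorm x == k) = false := beq_eq_false_iff_ne.mpr (Ne.symm hx)
      refine ⟨by simpa [hx] using h1, ?_⟩
      rw [List.find?_cons, hbx, h2]

theorem firstTermica_some (l : List String) (v : String) :
    l.foldl pvFirstTermica (some v) = some v := by
  induction l with
  | nil => rfl
  | cons x xs ih => rw [List.foldl_cons]; rw [show pvFirstTermica (some v) x = some v from rfl, ih]

theorem termica_pred_eq (ln : String) :
    (PySem.Str.isIn "58" ln || PySem.Str.isIn "xp-58" ln || PySem.Str.isIn "pos" ln)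
      = pvTermica ln := by
  unfold pvTermica
  by_cases h : PySem.Str.isIn "xp-58" ln = true
  · have h58 : PySem.Str.isIn "58" ln = true := by
      rw [PySem.Str.isIn_iff_infix] at h ⊢
      exact List.IsInfix.trans (by decide) h
    rw [h, h58]; rfl
  · rw [eq_false_of_ne_true h, Bool.or_false]

theorem firstTermica_find (l : List String) :
    l.foldl pvFirstTermica none
      = l.find? (fun n =>
          PySem.Str.isIn "58" (pyNorm n) || PySem.Str.isIn "xp-58" (pyNorm n) || PySem.Str.isIn "pos" (pyNorm n)) := by
  induction l with
  | nil => rfl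
  | cons x xs ih =>
    rw [List.foldl_cons, List.find?_cons]
    by_cases h : pvTermica (pyNorm x) = true
    · rw [show pvFirstTermica none x = some x from by simp [pvFirstTermica, h]]
      rw [firstTermica_some]
      rw [show (PySem.Str.isIn "58" (pyNorm x) || PySem.Str.isIn "xp-58" (pyNorm x) || PySem.Str.isIn "pos" (pyNorm x)) = true from by rw [termica_pred_eq]; exact h]
    · have hf : pvTermica (pyNorm x) = false := eq_false_of_ne_true h
      rw [show pvFirstTermica none x = none from by simp [pvFirstTermica, hf]]
      rw [show (PySem.Str.isIn "58" (pyNorm x) || PySem.Str.isIn "xp-58" (pyNorm x) || PySem.Str.isIn "pos" (pyNorm x)) = false from by rw [termica_pred_eq]; exact hf]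
      exact ih

-- A's config/default branch (dict hit, then linear rescue scan, then continuation k)
-- equals B's hit-or-continuation on the last-match fold
theorem pick_branch_eq (printers : List String) (name : Option String) (tag : String)
    (k : Option String × String) :
    (match (if (name.getD "") ≠ "" then
        match (printers.foldl (fun d n => d.insert (pyNorm n) n) PySem.Dict.empty).get? (pyNorm (name.getD "")) with
        | some v => some ((some v : Option String), tag)
        | none =>
          match printers.find? (fun n => pyNorm n == pyNorm (name.getD "")) with
          | some n => some (some n, tag)
          | none => none
      else none : Option (Option String × String)) with
     | some r => r
     | none => k)
    = (match printers.foldl (pvLastHit (match name with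
          | some c => if c ≠ "" then some (pyNorm c) else none
          | none => none)) none with
       | some c => (some c, tag)
       | none => k) := by
  cases name with
  | none => simp [lastHit_none]
  | some c =>
    by_cases hc : c = ""
    · simp [hc, lastHit_none]
    · simp only [Option.getD_some, ne_eq, hc, not_false_eq_true, if_pos]
      rw [get?_comprehension, PySem.Dict.get?_empty, pvLastHit_some_eq]
      cases hfold : printers.foldl (fun acc n => if pyNorm c = pyNorm n then some n else acc) none with
      | some v => rfl
      | none =>
        have hfind := (lastFold_none_find?_none printers (pyNorm c) none hfold).2
        rw [hfind]

-- ===== VERDICT (by name: the statement is the Claim_ definition above) =====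
theorem pick_fallback_py_spec : Claim_equal_pick_fallback_py := by
  intro config_name printers default_name _
  show pick_fallback_py config_name printers default_name = pick_fallback_py_alt config_name printers default_name
  simp only [pick_fallback_py, pick_fallback_py_alt, foldl_triple, firstTermica_find]
  rw [pick_branch_eq printers config_name "config", pick_branch_eq printers default_name "default"]
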